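-- pv_equiv track=rewrite | github.com/twizted/xen_maskcalc | xen_maskcalc.py | get_register_mask
-- ===== SOURCE A (Python) =====
-- def get_register_mask(regs):
--     """ Take a list of register values and return the calculated mask """
--     reg_n = len(regs)
--     mask = ''
--     for idx in range(32):
--         counter = 0
--         for reg in regs:
--             counter += 1 if (reg & (1 << idx) > 0) else 0
--         # if we have all 1s or all 0s we don't mask the bit
--         if counter == reg_n or counter == 0:
--             mask = mask + 'x'
--         else:
--             mask = mask + '0'
--     # we calculated the mask in reverse, so we reverse it again
--     return mask[::-1]
-- ===== SOURCE B (Python) =====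
-- def get_register_mask(regs):
--     """ Take a list of register values and return the calculated mask """
--     acc_and = -1
--     acc_or = 0
--     for reg in regs:
--         acc_and &= reg
--         acc_or |= reg
--     # a bit is masked ('0') iff not all registers agree on it:
--     # some register has it clear (AND bit = 0) and some has it set (OR bit = 1)
--     masked = ~acc_and & acc_or
--     return ''.join('0' if (masked >> idx) & 1 else 'x' for idx in range(31, -1, -1))
-- ===== Notes on version B (the rewrite author's own statement) =====
-- stated objective: faster
-- what changed: Instead of scanning all registers once per bit (32 passes, one counter each), B folds the register list once into AND and OR accumulators and reads each bit of ~AND & OR to decide the mask character.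
import Mathlib
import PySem

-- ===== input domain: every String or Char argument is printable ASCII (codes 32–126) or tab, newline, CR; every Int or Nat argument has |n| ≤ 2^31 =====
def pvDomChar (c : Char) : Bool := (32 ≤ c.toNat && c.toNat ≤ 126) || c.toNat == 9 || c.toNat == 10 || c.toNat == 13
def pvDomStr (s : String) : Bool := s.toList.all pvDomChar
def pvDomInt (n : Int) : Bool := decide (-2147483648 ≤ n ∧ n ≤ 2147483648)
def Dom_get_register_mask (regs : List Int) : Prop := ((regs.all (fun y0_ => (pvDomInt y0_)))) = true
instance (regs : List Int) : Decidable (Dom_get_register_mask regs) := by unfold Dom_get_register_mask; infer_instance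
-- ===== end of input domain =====

-- B replaces A's 32 passes over the register list (one counter per bit) by a single fold into
-- AND/OR accumulators, reading each mask character off one bit of ~AND & OR.

-- ===== PORT A =====
-- literal port of A: for each idx in range(32) count registers whose bit idx is set,
-- append 'x' if all or none have it, else '0'; mask[::-1] is List.reverse (PySem.Str.slice?_none_none_neg_one)
def get_register_mask (regs : List Int) : String :=
  let reg_n : Int := regs.length
  let mask : List Char :=
    (PySem.List.pyRange 0 32 1).foldl
      (fun (mask : List Char) idx =>
        let counter : Int :=
          regs.foldl (fun counter reg =>
            counter + if 0 < PySem.Int.band reg ((1 : Int) <<< idx.toNat) then 1 else 0) 0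
        if counter = reg_n ∨ counter = 0 then mask ++ ['x'] else mask ++ ['0']) []
  String.ofList mask.reverse

-- ===== PORT B =====
-- literal port of B: one fold producing (acc_and, acc_or), then masked = ~acc_and & acc_or,
-- and ''.join over range(31, -1, -1) reading bit idx of masked
def get_register_mask_alt (regs : List Int) : String :=
  let acc : Int × Int :=
    regs.foldl (fun (acc : Int × Int) reg =>
      (PySem.Int.band acc.1 reg, PySem.Int.bor acc.2 reg)) (-1, 0)
  let masked : Int := PySem.Int.band (Int.not acc.1) acc.2
  String.ofList ((PySem.List.pyRange 31 (-1) (-1)).map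
    (fun idx => if PySem.Int.band (masked >>> idx.toNat) 1 ≠ 0 then '0' else 'x'))

-- ===== PRECONDITION & SPEC =====
def Spec_get_register_mask (regs : List Int) (out : String) : Prop := out = get_register_mask_alt regs
instance (regs : List Int) (out : String) : Decidable (Spec_get_register_mask regs out) := by unfold Spec_get_register_mask; infer_instance

-- ===== CLAIM (what is proved, stated in full; the proofs are below) =====
def Claim_equal_get_register_mask : Prop := ∀ (regs : List Int), Dom_get_register_mask regs → Spec_get_register_mask regs (get_register_mask regs)

-- ===== LEMMAS AND PROOFS =====

-- the bits of m split into those shared with n and the rest: (m &&& n) + ldiff m n = m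
theorem pv_and_add_ldiff (m n : Nat) : (m &&& n) + Nat.ldiff m n = m := by
  induction m using Nat.binaryRec generalizing n with
  | zero => simp [Nat.ldiff]
  | bit b m ih =>
    rw [← Nat.bit_bodd_div2 n, Nat.land_bit, Nat.ldiff_bit, Nat.bit_val, Nat.bit_val, Nat.bit_val]
    have h := ih n.div2
    cases b <;> cases n.bodd <;> simp <;> omega

theorem pv_ldiff_eq_sub (m n : Nat) : Nat.ldiff m n = m - (m &&& n) := by
  have h := pv_and_add_ldiff m n
  omega

-- PySem's Python-exact & and | agree with Mathlib's Int.land / Int.lor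
theorem pv_band_eq_land (a b : Int) : PySem.Int.band a b = Int.land a b := by
  cases a with
  | ofNat m =>
    cases b with
    | ofNat n => simp [PySem.Int.band, Int.land]
    | negSucc n =>
      have h1 : ¬ (0 : Int) ≤ Int.negSucc n := by omega
      have h2 : (-(Int.negSucc n) - 1).toNat = n := by omega
      simp [PySem.Int.band, Int.land, h1, pv_ldiff_eq_sub]
  | negSucc m =>
    have h1 : ¬ (0 : Int) ≤ Int.negSucc m := by omega
    have h2 : (-(Int.negSucc m) - 1).toNat = m := by omega
    cases b with
    | ofNat n => simp [PySem.Int.band, Int.land, h1, pv_ldiff_eq_sub]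
    | negSucc n =>
      have h3 : ¬ (0 : Int) ≤ Int.negSucc n := by omega
      have h4 : (-(Int.negSucc n) - 1).toNat = n := by omega
      simp [PySem.Int.band, Int.land, Int.negSucc_eq]
      omega

theorem pv_bor_eq_lor (a b : Int) : PySem.Int.bor a b = Int.lor a b := by
  cases a with
  | ofNat m =>
    cases b with
    | ofNat n => simp [PySem.Int.bor, Int.lor]
    | negSucc n =>
      have h1 : ¬ (0 : Int) ≤ Int.negSucc n := by omega
      have h2 : (-(Int.negSucc n) - 1).toNat = n := by omega
      simp [PySem.Int.bor, Int.lor, pv_ldiff_eq_sub, Int.negSucc_eq]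
      omega
  | negSucc m =>
    have h1 : ¬ (0 : Int) ≤ Int.negSucc m := by omega
    have h2 : (-(Int.negSucc m) - 1).toNat = m := by omega
    cases b with
    | ofNat n =>
      simp [PySem.Int.bor, Int.lor, pv_ldiff_eq_sub, Int.negSucc_eq]
      omega
    | negSucc n =>
      have h3 : ¬ (0 : Int) ≤ Int.negSucc n := by omega
      have h4 : (-(Int.negSucc n) - 1).toNat = n := by omega
      simp [PySem.Int.bor, Int.lor, Int.negSucc_eq]
      omega

theorem pv_testBit_band (a b : Int) (k : Nat) :
    (PySem.Int.band a b).testBit k = (a.testBit k && b.testBit k) := by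
  rw [pv_band_eq_land, Int.testBit_land]

theorem pv_testBit_bor (a b : Int) (k : Nat) :
    (PySem.Int.bor a b).testBit k = (a.testBit k || b.testBit k) := by
  rw [pv_bor_eq_lor, Int.testBit_lor]

theorem pv_not_eq_lnot (a : Int) : Int.not a = Int.lnot a := by cases a <;> rfl

theorem pv_testBit_not (a : Int) (k : Nat) : (Int.not a).testBit k = !a.testBit k := by
  rw [pv_not_eq_lnot, Int.testBit_lnot]

theorem pv_testBit_neg_one (k : Nat) : (-1 : Int).testBit k = true := by
  show (Int.negSucc 0).testBit k = true
  simp [Int.testBit]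

theorem pv_testBit_zero_int (k : Nat) : (0 : Int).testBit k = false := by
  show (Int.ofNat 0).testBit k = false
  simp [Int.testBit]

-- A's bit test: reg & (1 << k) > 0  iff bit k of reg is set
theorem pv_pos_band_pow (r : Int) (k : Nat) :
    (0 < PySem.Int.band r ((1 : Int) <<< k)) ↔ r.testBit k = true := by
  have hsh : (1 : Int) <<< k = Int.ofNat (2 ^ k) := by
    show Int.ofNat (1 <<< k) = Int.ofNat (2 ^ k)
    simp [Nat.shiftLeft_eq]
  rw [pv_band_eq_land, hsh]
  cases r with
  | ofNat m =>
    rw [show Int.land (Int.ofNat m) (Int.ofNat (2 ^ k)) = Int.ofNat (m &&& 2 ^ k) from rfl,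
        Nat.and_two_pow]
    cases h : m.testBit k <;> simp [Int.testBit, h]
  | negSucc m =>
    rw [show Int.land (Int.negSucc m) (Int.ofNat (2 ^ k)) = Int.ofNat (Nat.ldiff (2 ^ k) m) from rfl,
        pv_ldiff_eq_sub, Nat.two_pow_and]
    have hp : 0 < 2 ^ k := Nat.two_pow_pos k
    cases h : m.testBit k <;> simp [Int.testBit, h]

-- B's bit test: (masked >> k) & 1 != 0  iff bit k of masked is set
theorem pv_band_shift_one (x : Int) (k : Nat) :
    (PySem.Int.band (x >>> k) 1 ≠ 0) ↔ x.testBit k = true := by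
  cases x with
  | ofNat m =>
    rw [show (Int.ofNat m) >>> k = Int.ofNat (m >>> k) from rfl]
    rw [show PySem.Int.band (Int.ofNat (m >>> k)) 1 = Int.ofNat ((m >>> k) &&& 1) from by
          rw [pv_band_eq_land]; rfl,
        Nat.and_one_is_mod]
    rw [show (Int.ofNat m).testBit k = m.testBit k from rfl,
        show m.testBit k = (m >>> k).testBit 0 from by
          simp,
        Nat.testBit_zero]
    rcases Nat.mod_two_eq_zero_or_one (m >>> k) with h | h <;> simp [h]
  | negSucc m =>
    rw [show (Int.negSucc m) >>> k = Int.negSucc (m >>> k) from rfl]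
    rw [show PySem.Int.band (Int.negSucc (m >>> k)) 1 = Int.ofNat (Nat.ldiff 1 (m >>> k)) from by
          rw [pv_band_eq_land]; rfl,
        pv_ldiff_eq_sub]
    rw [show (Int.negSucc m).testBit k = !m.testBit k from rfl,
        show m.testBit k = (m >>> k).testBit 0 from by
          simp,
        Nat.testBit_zero]
    rw [show (1 &&& (m >>> k)) = (m >>> k) % 2 from by rw [Nat.land_comm, Nat.and_one_is_mod]]
    rcases Nat.mod_two_eq_zero_or_one (m >>> k) with h | h <;> simp [h]

-- A's inner loop is a countP
theorem pv_foldl_count (q : Int → Prop) [DecidablePred q] :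
    ∀ (l : List Int) (c : Int),
      l.foldl (fun c r => c + if q r then 1 else 0) c
        = c + l.countP (fun r => decide (q r)) := by
  intro l
  induction l with
  | nil => intro c; simp
  | cons r t ih =>
    intro c
    simp only [List.foldl_cons, List.countP_cons, ih]
    by_cases h : q r <;> simp [h]
    omega

-- the pair fold of B splits into an AND fold and an OR fold
theorem pv_fold_pair (l : List Int) :
    ∀ (a o : Int),
      l.foldl (fun (acc : Int × Int) reg =>
          (PySem.Int.band acc.1 reg, PySem.Int.bor acc.2 reg)) (a, o)
        = (l.foldl (fun acc reg => PySem.Int.band acc reg) a,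
           l.foldl (fun acc reg => PySem.Int.bor acc reg) o) := by
  induction l with
  | nil => intro a o; simp
  | cons r t ih => intro a o; simp [ih]

theorem pv_fold_band_testBit (k : Nat) :
    ∀ (l : List Int) (a : Int),
      (l.foldl (fun acc reg => PySem.Int.band acc reg) a).testBit k
        = (a.testBit k && l.all (fun r => r.testBit k)) := by
  intro l
  induction l with
  | nil => intro a; simp
  | cons r t ih => intro a; simp [ih, pv_testBit_band, Bool.and_assoc]

theorem pv_fold_bor_testBit (k : Nat) :
    ∀ (l : List Int) (o : Int),
      (l.foldl (fun acc reg => PySem.Int.bor acc reg) o).testBit k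
        = (o.testBit k || l.any (fun r => r.testBit k)) := by
  intro l
  induction l with
  | nil => intro o; simp
  | cons r t ih => intro o; simp [ih, pv_testBit_bor, Bool.or_assoc]

-- A's append-in-a-loop is a map
theorem pv_foldl_append (q : Int → Prop) [DecidablePred q] (c1 c2 : Char) :
    ∀ (l : List Int) (acc : List Char),
      l.foldl (fun acc i => if q i then acc ++ [c1] else acc ++ [c2]) acc
        = acc ++ l.map (fun i => if q i then c1 else c2) := by
  intro l
  induction l with
  | nil => intro acc; simp
  | cons r t ih =>
    intro acc
    by_cases h : q r <;> simp [h, ih]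

-- per-bit agreement of the two mask characters
theorem pv_char_eq (regs : List Int) (k : Nat) :
    (if (regs.foldl (fun (counter : Int) (reg : Int) =>
          counter + if 0 < PySem.Int.band reg ((1 : Int) <<< k) then 1 else 0) (0 : Int)
            = (regs.length : Int)
        ∨ regs.foldl (fun (counter : Int) (reg : Int) =>
          counter + if 0 < PySem.Int.band reg ((1 : Int) <<< k) then 1 else 0) (0 : Int) = (0 : Int))
      then 'x' else '0')
    = (if PySem.Int.band
          ((PySem.Int.band (Int.not (regs.foldl (fun acc reg => PySem.Int.band acc reg) (-1)))
            (regs.foldl (fun acc reg => PySem.Int.bor acc reg) 0)) >>> k) 1 ≠ 0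
        then '0' else 'x') := by
  have hcnt : regs.foldl (fun (counter : Int) (reg : Int) =>
      counter + if 0 < PySem.Int.band reg ((1 : Int) <<< k) then 1 else 0) (0 : Int)
      = (regs.countP (fun r => r.testBit k) : Int) := by
    rw [pv_foldl_count (fun r => 0 < PySem.Int.band r ((1 : Int) <<< k)) regs 0, zero_add]
    congr 1
    apply List.countP_congr
    intro r _
    simp only [decide_eq_true_eq]
    exact (pv_pos_band_pow r k).trans (by simp)
  have hmask : (PySem.Int.band ((PySem.Int.band
        (Int.not (regs.foldl (fun acc reg => PySem.Int.band acc reg) (-1)))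
        (regs.foldl (fun acc reg => PySem.Int.bor acc reg) 0)) >>> k) 1 ≠ 0)
      ↔ ((!regs.all (fun r => r.testBit k)) && regs.any (fun r => r.testBit k)) = true := by
    rw [pv_band_shift_one, pv_testBit_band, pv_testBit_not,
        pv_fold_band_testBit, pv_fold_bor_testBit, pv_testBit_neg_one, pv_testBit_zero_int]
    simp
  have hA : (regs.foldl (fun (counter : Int) (reg : Int) =>
        counter + if 0 < PySem.Int.band reg ((1 : Int) <<< k) then 1 else 0) (0 : Int)
          = (regs.length : Int)
      ∨ regs.foldl (fun (counter : Int) (reg : Int) =>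
        counter + if 0 < PySem.Int.band reg ((1 : Int) <<< k) then 1 else 0) (0 : Int) = (0 : Int))
      ↔ (regs.all (fun r => r.testBit k) = true ∨ regs.any (fun r => r.testBit k) = false) := by
    simp only [hcnt]
    rw [show ((regs.countP (fun r => r.testBit k) : Int) = (regs.length : Int))
          = (regs.countP (fun r => r.testBit k) = regs.length) from by
        simp [Nat.cast_inj],
      show ((regs.countP (fun r => r.testBit k) : Int) = 0)
          = (regs.countP (fun r => r.testBit k) = 0) from by
        simp]
    rw [List.countP_eq_length, List.countP_eq_zero]
    simp [List.all_eq_true, List.any_eq_false]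
  rw [if_congr hA rfl rfl, if_congr hmask rfl rfl]
  cases hall : regs.all (fun r => r.testBit k) <;>
    cases hany : regs.any (fun r => r.testBit k) <;> simp

-- pv_char_eq restated with the ports' Int index (idx.toNat) shape
theorem pv_char_eq' (regs : List Int) (x : Int) :
    (if (regs.foldl (fun (counter : Int) (reg : Int) =>
          counter + if 0 < PySem.Int.band reg ((1 : Int) <<< x.toNat) then 1 else 0) (0 : Int)
            = (regs.length : Int)
        ∨ regs.foldl (fun (counter : Int) (reg : Int) =>
          counter + if 0 < PySem.Int.band reg ((1 : Int) <<< x.toNat) then 1 else 0) (0 : Int) = (0 : Int))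
      then 'x' else '0')
    = (if PySem.Int.band
          ((PySem.Int.band (Int.not (regs.foldl (fun acc reg => PySem.Int.band acc reg) (-1)))
            (regs.foldl (fun acc reg => PySem.Int.bor acc reg) 0)) >>> x.toNat) 1 ≠ 0
        then '0' else 'x') := pv_char_eq regs x.toNat

-- ===== VERDICT (by name: the statement is the Claim_ definition above) =====
theorem get_register_mask_spec : Claim_equal_get_register_mask := by
  intro regs _
  unfold Spec_get_register_mask get_register_mask get_register_mask_alt
  dsimp only
  rw [pv_fold_pair]
  dsimp only
  rw [pv_foldl_append _ 'x' '0' (PySem.List.pyRange 0 32 1) [],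
      List.nil_append,
      PySem.List.pyRange_neg_one_eq_reverse,
      show ((-1 : Int) + 1) = 0 from by norm_num,
      show ((31 : Int) + 1) = 32 from by norm_num,
      List.map_reverse]
  congr 1
  congr 1
  apply List.map_congr_left
  intro x hx
  simp only [Int.shiftLeft_natCast_right, Int.shiftRight_natCast_right, Nat.cast_zero]
  exact pv_char_eq' regs x
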